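-- pv_equiv track=rewrite | github.com/guige01-guinsa/parking_man | backend/app/plates.py | _repair_digit_fragment
-- ===== SOURCE A (Python) =====
-- DIGIT_SIMILAR_MAP = {
--     "O": "0",
--     "Q": "0",
--     "D": "0",
--     "U": "0",
--     "I": "1",
--     "L": "1",
--     "|": "1",
--     "!": "1",
--     "Z": "2",
--     "A": "4",
--     "S": "5",
--     "$": "5",
--     "G": "6",
--     "T": "7",
--     "B": "8",
-- }
--
-- def _repair_digit_fragment(fragment: str) -> tuple[str, int] | None:
--     digits: list[str] = []
--     repairs = 0
--     for char in fragment: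
--         if char.isdigit():
--             digits.append(char)
--             continue
--         mapped = DIGIT_SIMILAR_MAP.get(char)
--         if not mapped:
--             return None
--         digits.append(mapped)
--         repairs += 1
--     return "".join(digits), repairs
-- ===== SOURCE B (Python) =====
-- DIGIT_SIMILAR_MAP = {
--     "O": "0",
--     "Q": "0",
--     "D": "0",
--     "U": "0",
--     "I": "1",
--     "L": "1",
--     "|": "1",
--     "!": "1",
--     "Z": "2",
--     "A": "4",
--     "S": "5",
--     "$": "5",
--     "G": "6",
--     "T": "7",
--     "B": "8",
-- }
--
-- _TABLE = str.maketrans(DIGIT_SIMILAR_MAP)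
--
--
-- def _repair_digit_fragment(fragment: str) -> "tuple[str, int] | None":
--     if any(not (c.isdigit() or c in DIGIT_SIMILAR_MAP) for c in fragment):
--         return None
--     repairs = sum(1 for c in fragment if not c.isdigit())
--     return fragment.translate(_TABLE), repairs
-- ===== Notes on version B (the rewrite author's own statement) =====
-- stated objective: idiomatic
-- what changed: Replaces the fused accumulate-or-bail loop with a validation pass (any), a counting pass (sum over non-digits), and str.translate with a table built once from DIGIT_SIMILAR_MAP.
import Mathlib
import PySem

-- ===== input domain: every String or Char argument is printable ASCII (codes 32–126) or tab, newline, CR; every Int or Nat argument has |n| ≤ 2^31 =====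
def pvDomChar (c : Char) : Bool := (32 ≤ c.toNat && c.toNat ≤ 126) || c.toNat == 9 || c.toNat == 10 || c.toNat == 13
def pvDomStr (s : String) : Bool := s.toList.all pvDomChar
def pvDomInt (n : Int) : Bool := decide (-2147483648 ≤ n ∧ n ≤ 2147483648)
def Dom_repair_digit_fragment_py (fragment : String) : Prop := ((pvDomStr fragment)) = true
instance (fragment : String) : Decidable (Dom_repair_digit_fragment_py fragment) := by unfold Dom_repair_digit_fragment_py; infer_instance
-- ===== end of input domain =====

-- B replaces A's fused accumulate-or-bail loop with a validation pass, a non-digit count, and a translate map (idiomatic decomposition, same cost).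


-- module constant DIGIT_SIMILAR_MAP (shared by both ports, as in the Python module)
def DIGIT_SIMILAR_MAP : PySem.Dict Char Char := PySem.Dict.ofList
  [('O','0'),('Q','0'),('D','0'),('U','0'),('I','1'),('L','1'),('|','1'),('!','1'),
   ('Z','2'),('A','4'),('S','5'),('$','5'),('G','6'),('T','7'),('B','8')]

-- ===== PORT A =====
-- the for-loop with early return: structural recursion over the chars, carrying (digits, repairs)
def repairLoopA (cs : List Char) (digits : List Char) (repairs : Int) : Option (String × Int) :=
  match cs with
  | [] => some (String.ofList digits, repairs)
  | c :: rest =>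
    if PySem.Chars.isdigit c then repairLoopA rest (digits ++ [c]) repairs
    else
      match DIGIT_SIMILAR_MAP.get? c with
      | none => none
      | some m => repairLoopA rest (digits ++ [m]) (repairs + 1)

def repair_digit_fragment_py (fragment : String) : Option (String × Int) :=
  repairLoopA fragment.toList [] 0

-- ===== PORT B =====
def repair_digit_fragment_py_alt (fragment : String) : Option (String × Int) :=
  let cs := fragment.toList
  if cs.any (fun c => !(PySem.Chars.isdigit c || DIGIT_SIMILAR_MAP.contains c)) then
    none
  else
    -- repairs = sum(1 for c in fragment if not c.isdigit())
    -- result  = fragment.translate(_TABLE): each char replaced by its table entry if present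
    some (String.ofList (cs.map (fun c => (DIGIT_SIMILAR_MAP.get? c).getD c)),
          ((cs.filter (fun c => !PySem.Chars.isdigit c)).length : Int))

-- ===== PRECONDITION & SPEC =====
def Spec_repair_digit_fragment_py (fragment : String) (out : Option (String × Int)) : Prop := out = repair_digit_fragment_py_alt fragment
instance (fragment : String) (out : Option (String × Int)) : Decidable (Spec_repair_digit_fragment_py fragment out) := by unfold Spec_repair_digit_fragment_py; infer_instance

-- ===== CLAIM (what is proved, stated in full; the proofs are below) =====
def Claim_equal_repair_digit_fragment_py : Prop := ∀ (fragment : String), Dom_repair_digit_fragment_py fragment → Spec_repair_digit_fragment_py fragment (repair_digit_fragment_py fragment)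

-- ===== LEMMAS AND PROOFS =====

-- no key of DIGIT_SIMILAR_MAP is a digit, so translate leaves digit chars alone
set_option maxHeartbeats 1000000 in
theorem digitMap_mk : DIGIT_SIMILAR_MAP = PySem.Dict.mk
    [('O','0'),('Q','0'),('D','0'),('U','0'),('I','1'),('L','1'),('|','1'),('!','1'),
     ('Z','2'),('A','4'),('S','5'),('$','5'),('G','6'),('T','7'),('B','8')] := by decide

set_option maxHeartbeats 2000000 in
theorem get?_of_isdigit (c : Char) (h : PySem.Chars.isdigit c = true) :
    DIGIT_SIMILAR_MAP.get? c = none := by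
  have hn : 48 ≤ c.toNat ∧ c.toNat ≤ 57 := by
    unfold PySem.Chars.isdigit at h
    simp only [Bool.and_eq_true, decide_eq_true_eq, Char.le_def] at h
    exact ⟨h.1, h.2⟩
  have hk : ∀ (k : Char), ¬(48 ≤ k.toNat ∧ k.toNat ≤ 57) → (k == c) = false := by
    intro k hnk
    rw [beq_eq_false_iff_ne]
    intro e; subst e; exact hnk hn
  rw [digitMap_mk]
  repeat rw [PySem.Dict.get?_mk_cons]
  simp only [hk 'O' (by decide), hk 'Q' (by decide), hk 'D' (by decide), hk 'U' (by decide),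
    hk 'I' (by decide), hk 'L' (by decide), hk '|' (by decide), hk '!' (by decide),
    hk 'Z' (by decide), hk 'A' (by decide), hk 'S' (by decide), hk '$' (by decide),
    hk 'G' (by decide), hk 'T' (by decide), hk 'B' (by decide), Bool.false_eq_true,
    if_false]
  rfl

theorem repairLoopA_eq (cs : List Char) (digits : List Char) (repairs : Int) :
    repairLoopA cs digits repairs =
      if cs.any (fun c => !(PySem.Chars.isdigit c || DIGIT_SIMILAR_MAP.contains c)) then none
      else some (String.ofList (digits ++ cs.map (fun c => (DIGIT_SIMILAR_MAP.get? c).getD c)),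
                 repairs + ((cs.filter (fun c => !PySem.Chars.isdigit c)).length : Int)) := by
  induction cs generalizing digits repairs with
  | nil => simp [repairLoopA]
  | cons c rest ih =>
    by_cases hd : PySem.Chars.isdigit c = true
    · have hg := get?_of_isdigit c hd
      simp [repairLoopA, hd, ih, hg, PySem.Dict.contains_eq_isSome_get?]
    · rcases hm : DIGIT_SIMILAR_MAP.get? c with _ | m
      · simp [repairLoopA, hd, hm, PySem.Dict.contains_eq_isSome_get?]
      · simp only [repairLoopA, hd, hm, if_neg, Bool.false_eq_true, not_false_iff, ih]
        have hc : DIGIT_SIMILAR_MAP.contains c = true := by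
          simp [PySem.Dict.contains_eq_isSome_get?, hm]
        simp [hd, hc, hm]
        split_ifs with h
        · rfl
        · simp only [Option.some.injEq, Prod.mk.injEq, true_and]
          ring

-- ===== VERDICT (by name: the statement is the Claim_ definition above) =====
theorem repair_digit_fragment_py_spec : Claim_equal_repair_digit_fragment_py := by
  intro fragment _
  unfold Spec_repair_digit_fragment_py repair_digit_fragment_py repair_digit_fragment_py_alt
  simp [repairLoopA_eq]
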